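-- pv_equiv track=rewrite | github.com/guanning03/reasoning-verifier | utils/utils.py | extract_model_shortname
-- ===== SOURCE A (Python) =====
-- def extract_model_shortname(model_path):
--     parts = model_path.split('/')
--     for i in range(len(parts)-1, -1, -1):
--         part = parts[i]
--         if part in ['huggingface', 'actor'] or part.startswith('global_step_'):
--             continue
--         if i < len(parts)-1 and parts[i+1].startswith('global_step_'):
--             return f"{part}_{parts[i+1]}"
--         return part
--     return parts[-1]
-- ===== SOURCE B (Python) =====
-- def extract_model_shortname(model_path):
--     ans = None
--     prev_kept = False
--     last = ''
--     for part in model_path.split('/'):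
--         if part not in ('huggingface', 'actor') and not part.startswith('global_step_'):
--             ans, prev_kept = part, True
--         elif prev_kept and part.startswith('global_step_'):
--             ans, prev_kept = ans + '_' + part, False
--         else:
--             prev_kept = False
--         last = part
--     return ans if ans is not None else last
-- ===== Notes on version B (the rewrite author's own statement) =====
-- stated objective: alternative
-- what changed: Replaces A's backward index scan with early returns by a single forward fold over the parts that maintains a running answer, a previous-part-was-kept flag and the last part, with no index arithmetic.
import Mathlib
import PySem

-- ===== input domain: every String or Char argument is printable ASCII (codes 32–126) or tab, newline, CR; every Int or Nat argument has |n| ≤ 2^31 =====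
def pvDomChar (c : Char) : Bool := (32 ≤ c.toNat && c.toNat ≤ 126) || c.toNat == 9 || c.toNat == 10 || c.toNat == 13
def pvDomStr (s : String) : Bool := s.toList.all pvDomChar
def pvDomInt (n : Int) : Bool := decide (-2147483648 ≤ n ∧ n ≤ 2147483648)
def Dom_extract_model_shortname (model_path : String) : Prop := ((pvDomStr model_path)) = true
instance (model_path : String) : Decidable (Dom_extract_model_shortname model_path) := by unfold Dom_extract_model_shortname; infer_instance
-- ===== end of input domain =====

-- B replaces A's backward index scan by a single forward fold maintaining a running
-- answer, a previous-part-kept flag and the last part (objective: alternative).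

-- ===== PORT A =====
-- the skip test of A's first 'if'
def pvSkip (p : String) : Bool :=
  p == "huggingface" || p == "actor" || PySem.Str.startswith p "global_step_"

-- the 'for i in range(len(parts)-1, -1, -1)' loop: fuel n = i+1, none = loop fell through
def pvALoop (parts : List String) : Nat → Option String
  | 0 => none
  | k+1 =>
    let part := PySem.List.pyGetD parts (k : Int) ""
    if pvSkip part then pvALoop parts k
    else if ((k : Int) < (parts.length : Int) - 1 &&
             PySem.Str.startswith (PySem.List.pyGetD parts ((k : Int) + 1) "") "global_step_") then
      some (part ++ "_" ++ PySem.List.pyGetD parts ((k : Int) + 1) "")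
    else some part

def extract_model_shortname (model_path : String) : String :=
  let parts := (PySem.Str.split? model_path "/").getD []  -- sep "/" ≠ "" so split? is always some; the default [] is never used
  match pvALoop parts parts.length with
  | some r => r
  | none => PySem.List.pyGetD parts (-1) ""

-- ===== PORT B =====
-- B's keep test: part not in ('huggingface','actor') and not part.startswith('global_step_')
def pvKeep (p : String) : Bool :=
  !(p == "huggingface" || p == "actor") && !PySem.Str.startswith p "global_step_"

-- one iteration of B's forward loop; state = (ans, prev_kept, last)
def pvStep (st : Option String × Bool × String) (part : String) : Option String × Bool × String :=
  if pvKeep part then (some part, true, part)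
  else if st.2.1 && PySem.Str.startswith part "global_step_" then
    (st.1.map (fun a => a ++ "_" ++ part), false, part)  -- ans is always some here (prev_kept → ans set)
  else (st.1, false, part)

def extract_model_shortname_alt (model_path : String) : String :=
  let parts := (PySem.Str.split? model_path "/").getD []  -- sep "/" ≠ "" so split? is always some; the default [] is never used
  let st := parts.foldl pvStep (none, false, "")
  match st.1 with
  | some a => a
  | none => st.2.2

-- ===== PRECONDITION & SPEC =====
def Spec_extract_model_shortname (model_path : String) (out : String) : Prop := out = extract_model_shortname_alt model_path
instance (model_path : String) (out : String) : Decidable (Spec_extract_model_shortname model_path out) := by unfold Spec_extract_model_shortname; infer_instance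

-- ===== CLAIM (what is proved, stated in full; the proofs are below) =====
def Claim_equal_extract_model_shortname : Prop := ∀ (model_path : String), Dom_extract_model_shortname model_path → Spec_extract_model_shortname model_path (extract_model_shortname model_path)

-- ===== LEMMAS AND PROOFS =====

theorem pvKeep_eq_not_skip (p : String) : pvKeep p = !pvSkip p := by
  simp [pvKeep, pvSkip]

-- the value A returns when it stops at index k
def pvRes (parts : List String) (k : Nat) : String :=
  if ((k : Int) < (parts.length : Int) - 1 &&
      PySem.Str.startswith (PySem.List.pyGetD parts ((k : Int) + 1) "") "global_step_") then
    PySem.List.pyGetD parts (k : Int) "" ++ "_" ++ PySem.List.pyGetD parts ((k : Int) + 1) ""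
  else PySem.List.pyGetD parts (k : Int) ""

-- the kept indices of parts
def pvKN (parts : List String) : List Nat :=
  (List.range parts.length).filter (fun k : Nat => pvKeep (PySem.List.pyGetD parts (k : Int) ""))

-- whether the last part is kept
def pvLK (parts : List String) : Bool :=
  match parts.getLast? with
  | some p => pvKeep p
  | none => false

-- A's backward loop stops at the LAST index whose part is kept
theorem pvALoop_eq (parts : List String) (n : Nat) :
    pvALoop parts n =
      (((List.range n).filter (fun k : Nat => pvKeep (PySem.List.pyGetD parts (k : Int) ""))).getLast?).map (pvRes parts) := by
  induction n with
  | zero => rfl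
  | succ m ih =>
    rw [List.range_succ, List.filter_append]
    by_cases h : pvKeep (PySem.List.pyGetD parts (m : Int) "") = true
    · have hs : pvSkip (PySem.List.pyGetD parts (m : Int) "") = false := by
        rw [pvKeep_eq_not_skip] at h
        simpa using h
      rw [List.filter_singleton, h, cond_true, List.getLast?_concat]
      simp only [pvALoop, hs, Bool.false_eq_true, if_false]
      unfold pvRes
      simp only [Option.map_some]
      exact (apply_ite some _ _ _).symm
    · have hs : pvSkip (PySem.List.pyGetD parts (m : Int) "") = true := by
        rw [pvKeep_eq_not_skip] at h
        simpa using h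
      have hb : pvKeep (PySem.List.pyGetD parts (m : Int) "") = false := by simpa using h
      rw [List.filter_singleton, hb, cond_false, List.append_nil]
      simp only [pvALoop, hs, if_pos]
      exact ih

-- indexing an appended list below the old length
theorem pvGetD_append_lt (xs : List String) (p : String) (k : Nat) (h : k < xs.length) :
    PySem.List.pyGetD (xs ++ [p]) (k : Int) "" = PySem.List.pyGetD xs (k : Int) "" := by
  simp only [PySem.List.pyGetD_natCast, List.getD, List.getElem?_append_left h]

theorem pvGetD_append_self (xs : List String) (p : String) :
    PySem.List.pyGetD (xs ++ [p]) (xs.length : Int) "" = p := by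
  simp [PySem.List.pyGetD_natCast, List.getD]

theorem pvKN_append (xs : List String) (p : String) :
    pvKN (xs ++ [p]) = pvKN xs ++ (if pvKeep p then [xs.length] else []) := by
  unfold pvKN
  rw [List.length_append, List.length_singleton, List.range_succ, List.filter_append]
  congr 1
  · apply List.filter_congr
    intro k hk
    rw [pvGetD_append_lt xs p k (List.mem_range.mp hk)]
  · rw [List.filter_singleton, pvGetD_append_self]
    cases h : pvKeep p <;> simp

-- pvRes on an appended list, at an index below the old length
theorem pvRes_append (xs : List String) (p : String) (k : Nat) (h : k < xs.length) :
    pvRes (xs ++ [p]) k =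
      if k = xs.length - 1 then
        (if PySem.Str.startswith p "global_step_" then
          PySem.List.pyGetD xs (k : Int) "" ++ "_" ++ p
        else PySem.List.pyGetD xs (k : Int) "")
      else pvRes xs k := by
  unfold pvRes
  by_cases hk : k = xs.length - 1
  · subst hk
    have h1 : ((xs.length - 1 : Nat) : Int) + 1 = (xs.length : Int) := by omega
    have hd1 : (decide (((xs.length - 1 : Nat) : Int) < ((xs ++ [p]).length : Int) - 1)) = true := by
      apply decide_eq_true
      simp only [List.length_append, List.length_singleton]
      push_cast
      omega
    rw [if_pos rfl, hd1, h1, pvGetD_append_self, pvGetD_append_lt xs p _ h, Bool.true_and]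
  · have hk' : k + 1 < xs.length := by omega
    have hd2 : (decide ((k : Int) < ((xs ++ [p]).length : Int) - 1)) = true := by
      apply decide_eq_true
      simp only [List.length_append, List.length_singleton]
      push_cast
      omega
    have hd2' : (decide ((k : Int) < (xs.length : Int) - 1)) = true := decide_eq_true (by omega)
    have h3 : ((k : Int) + 1) = ((k + 1 : Nat) : Int) := by push_cast; ring
    rw [if_neg hk, hd2, hd2', h3, pvGetD_append_lt xs p _ hk', pvGetD_append_lt xs p _ h]

-- when the last part is kept, the last kept index is length-1
theorem pvKN_getLast?_of_LK (xs : List String) (h : pvLK xs = true) :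
    xs ≠ [] ∧ (pvKN xs).getLast? = some (xs.length - 1) := by
  unfold pvLK at h
  cases hx : xs.getLast? with
  | none => rw [hx] at h; simp at h
  | some q =>
    rw [hx] at h
    have h' : pvKeep q = true := h
    have hne : xs ≠ [] := by
      intro h0; subst h0; simp at hx
    refine ⟨hne, ?_⟩
    have hlen : 0 < xs.length := List.length_pos_iff.mpr hne
    have hgd : PySem.List.pyGetD xs ((xs.length - 1 : Nat) : Int) "" = q := by
      rw [PySem.List.pyGetD_natCast, List.getD_eq_getElem _ _ (by omega)]
      have h3 : xs.getLast hne = q :=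
        Option.some.inj ((List.getLast?_eq_some_getLast hne).symm.trans hx)
      rw [List.getLast_eq_getElem] at h3
      exact h3
    have hrs : xs.length = (xs.length - 1) + 1 := by omega
    have hKN : pvKN xs =
        (List.range (xs.length - 1)).filter
          (fun k : Nat => pvKeep (PySem.List.pyGetD xs (k : Int) "")) ++ [xs.length - 1] := by
      unfold pvKN
      conv_lhs => rw [hrs]
      rw [List.range_succ, List.filter_append, List.filter_singleton, hgd, h', cond_true]
    rw [hKN, List.getLast?_concat]

-- a kept index is in range and keeps its part
theorem pvKN_mem (xs : List String) (k : Nat) (h : k ∈ pvKN xs) :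
    k < xs.length ∧ pvKeep (PySem.List.pyGetD xs (k : Int) "") = true := by
  unfold pvKN at h
  have h2 := List.mem_filter.mp h
  exact ⟨List.mem_range.mp h2.1, h2.2⟩

-- pvRes at the last index of xs is just the last part (the lookahead condition is false)
theorem pvRes_last (xs : List String) (hlen : 0 < xs.length) :
    pvRes xs (xs.length - 1) = PySem.List.pyGetD xs ((xs.length - 1 : Nat) : Int) "" := by
  unfold pvRes
  have hcf : (decide (((xs.length - 1 : Nat) : Int) < (xs.length : Int) - 1)) = false :=
    decide_eq_false (by omega)
  rw [hcf, Bool.false_and]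
  simp

-- the invariant of B's forward fold
theorem pvFold_eq (xs : List String) :
    xs.foldl pvStep (none, false, "") =
      (((pvKN xs).getLast?).map (pvRes xs), pvLK xs, xs.getLastD "") := by
  induction xs using List.reverseRecOn with
  | nil => rfl
  | append_singleton xs p ih =>
    rw [List.foldl_append, ih, List.foldl_cons, List.foldl_nil]
    have hLK : pvLK (xs ++ [p]) = pvKeep p := by
      unfold pvLK; rw [List.getLast?_concat]
    have hLD : (xs ++ [p]).getLastD "" = p := List.getLastD_concat
    by_cases hkp : pvKeep p = true
    · -- kept: answer resets to p
      rw [pvStep, if_pos hkp, hLK, hLD, pvKN_append, if_pos hkp, List.getLast?_concat]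
      simp only [Option.map_some, hkp]
      unfold pvRes
      have hc : (decide ((xs.length : Int) < ((xs ++ [p]).length : Int) - 1)) = false := by
        apply decide_eq_false
        simp only [List.length_append, List.length_singleton]
        push_cast
        omega
      rw [hc, Bool.false_and]
      simp
    · have hkp' : pvKeep p = false := by simpa using hkp
      rw [pvStep, if_neg hkp, hLK, hLD, pvKN_append, hkp']
      simp only [Bool.false_eq_true, if_false, List.append_nil]
      by_cases hgs : (pvLK xs && PySem.Str.startswith p "global_step_") = true
      · -- prev kept and p is a global_step_: append
        have hLKxs : pvLK xs = true := (Bool.and_eq_true _ _ |>.mp hgs).1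
        have hsw : PySem.Str.startswith p "global_step_" = true := (Bool.and_eq_true _ _ |>.mp hgs).2
        obtain ⟨hne, hlast⟩ := pvKN_getLast?_of_LK xs hLKxs
        have hlen : 0 < xs.length := List.length_pos_iff.mpr hne
        rw [if_pos hgs, hlast]
        simp only [Option.map_some]
        refine Prod.ext ?_ rfl
        show some (pvRes xs (xs.length - 1) ++ "_" ++ p) = some (pvRes (xs ++ [p]) (xs.length - 1))
        rw [pvRes_append xs p _ (by omega), if_pos rfl, if_pos hsw, pvRes_last xs hlen]
      · -- plain skip: answer unchanged, but stated over the longer list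
        rw [if_neg hgs]
        refine Prod.ext ?_ rfl
        show Option.map (pvRes xs) (pvKN xs).getLast? = Option.map (pvRes (xs ++ [p])) (pvKN xs).getLast?
        cases hlast : (pvKN xs).getLast? with
        | none => simp
        | some j =>
          obtain ⟨hjlt, hjk⟩ := pvKN_mem xs j (List.mem_of_getLast? hlast)
          simp only [Option.map_some, Option.some.injEq]
          rw [pvRes_append xs p _ hjlt]
          by_cases hje : j = xs.length - 1
          · -- then the last part of xs is kept, so p cannot be a global_step_
            subst hje
            have hne : xs ≠ [] := by
              intro h0
              subst h0
              simp at hjlt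
            have hLKxs : pvLK xs = true := by
              unfold pvLK
              rw [List.getLast?_eq_some_getLast hne]
              have hgl : PySem.List.pyGetD xs ((xs.length - 1 : Nat) : Int) "" = xs.getLast hne := by
                rw [PySem.List.pyGetD_natCast, List.getD_eq_getElem _ _ (by omega),
                    List.getLast_eq_getElem]
              rw [← hgl]
              exact hjk
            have hsw : PySem.Str.startswith p "global_step_" = false := by
              cases hsw' : PySem.Str.startswith p "global_step_"
              · rfl
              · exact absurd (by rw [hLKxs, hsw']; rfl :
                  (pvLK xs && PySem.Str.startswith p "global_step_") = true) hgs
            rw [if_pos rfl, hsw]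
            simp only [Bool.false_eq_true, if_false]
            have hlen : 0 < xs.length := List.length_pos_iff.mpr hne
            rw [pvRes_last xs hlen]
          · rw [if_neg hje]

-- split with a nonempty separator never yields the empty list
theorem pvGo_ne_nil (sep : List Char) :
    ∀ fuel l cur acc, PySem.Chars.splitOn.go sep fuel l cur acc ≠ [] := by
  intro fuel
  induction fuel with
  | zero => intro l cur acc; simp [PySem.Chars.splitOn.go]
  | succ n ih =>
    intro l cur acc
    cases l with
    | nil => simp [PySem.Chars.splitOn.go]
    | cons c rest =>
      rw [PySem.Chars.splitOn.go]
      split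
      · exact ih _ _ _
      · exact ih _ _ _

theorem pvSplit_ne_nil (s : String) : ((PySem.Str.split? s "/").getD []) ≠ [] := by
  simp [PySem.Str.split?, PySem.Chars.split?, PySem.Chars.splitOn]
  exact pvGo_ne_nil _ _ _ _ _

-- the two result selections agree on any nonempty parts list
theorem pvMain (parts : List String) (hne : parts ≠ []) :
    (match pvALoop parts parts.length with
     | some r => r
     | none => PySem.List.pyGetD parts (-1) "") =
    (match (parts.foldl pvStep (none, false, "")).1 with
     | some a => a
     | none => (parts.foldl pvStep (none, false, "")).2.2) := by
  rw [pvALoop_eq, pvFold_eq]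
  show (match ((pvKN parts).getLast?).map (pvRes parts) with
        | some r => r
        | none => PySem.List.pyGetD parts (-1) "") = _
  cases hlast : (pvKN parts).getLast? with
  | none =>
    simp only [Option.map_none]
    rw [PySem.List.pyGetD_neg_one _ _ hne, List.getLastD_eq_getLast?,
        List.getLast?_eq_some_getLast hne]
    rfl
  | some j => simp

-- ===== VERDICT (by name: the statement is the Claim_ definition above) =====
theorem extract_model_shortname_spec : Claim_equal_extract_model_shortname := by
  intro model_path _
  unfold Spec_extract_model_shortname extract_model_shortname extract_model_shortname_alt
  exact pvMain _ (pvSplit_ne_nil model_path)
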